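-- pv_equiv track=rewrite | github.com/mzandvliet/Sympy-Bezier | benford.py | is_first_digit_one
-- ===== SOURCE A (Python) =====
-- def is_first_digit_one(number, maxDigits):
--     '''
--     Returns True if the leading digit of number is 1, False if not.
--
--     Parameters:
--         number (int): A decimal integer
--         maxDigits (int): A natural number indicating the maximum amount of digits to check
--     '''
--
--     # Run through all decimal digits from lowest to highest, keep track of which
--     # last non-zero number was seen
--     result = False
--     for d in range(maxDigits):
--         digit = get_digit(number, d)
--         if (digit == 1):
--             result = True
--         elif (digit > 1):
--             result = False
--
--     return result
--
-- def get_digit(number, n):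
--     '''
--     Returns the value of the n'th digit in number
--
--     Parameters:
--         number (int): A decimal integer
--         n (int): A natural number indicating the index of the digit in number to check
--     '''
--     return number // 10**n % 10
-- ===== SOURCE B (Python) =====
-- def is_first_digit_one(number, maxDigits):
--     # High-to-low scan: the first non-zero digit found is the leading digit
--     # within the window; return whether it is 1. False if all digits are 0.
--     for d in range(maxDigits - 1, -1, -1):
--         digit = number // 10**d % 10
--         if digit != 0:
--             return digit == 1
--     return False
-- ===== Notes on version B (the rewrite author's own statement) =====
-- stated objective: alternative
-- what changed: Replaces the full low-to-high flag-maintaining pass with a high-to-low scan that early-returns 'digit == 1' at the first non-zero digit (the leading digit of the window).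
import Mathlib
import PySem

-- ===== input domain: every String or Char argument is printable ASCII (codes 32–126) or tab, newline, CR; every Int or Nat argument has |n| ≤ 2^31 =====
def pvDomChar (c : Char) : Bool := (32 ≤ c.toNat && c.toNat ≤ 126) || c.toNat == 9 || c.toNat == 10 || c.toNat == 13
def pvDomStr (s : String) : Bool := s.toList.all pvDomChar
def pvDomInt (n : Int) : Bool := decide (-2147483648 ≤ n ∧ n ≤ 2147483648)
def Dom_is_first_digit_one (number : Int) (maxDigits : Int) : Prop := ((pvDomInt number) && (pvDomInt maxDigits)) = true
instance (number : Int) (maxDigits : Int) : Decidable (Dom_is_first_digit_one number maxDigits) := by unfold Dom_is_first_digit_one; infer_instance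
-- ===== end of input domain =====

-- B replaces A's full low-to-high flag-updating pass by a high-to-low scan that
-- returns at the first non-zero digit (alternative decomposition; same cost class).

-- ===== PORT A =====
-- get_digit(number, n) = number // 10**n % 10 ; n comes from range(maxDigits) so n >= 0,
-- hence 10**n is ported exactly as 10 ^ n.toNat.
def get_digit (number : Int) (n : Int) : Int :=
  PySem.Int.mod (PySem.Int.floordiv number (10 ^ n.toNat)) 10

def is_first_digit_one (number : Int) (maxDigits : Int) : Bool :=
  (PySem.List.pyRange 0 maxDigits 1).foldl
    (fun result d =>
      let digit := get_digit number d
      if digit == 1 then true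
      else if digit > 1 then false
      else result)
    false

-- ===== PORT B =====
-- the loop for d in range(maxDigits-1, -1, -1): first non-zero digit decides.
def altScan (number : Int) : Nat → Bool
  | 0 => false
  | d + 1 =>
    let digit := PySem.Int.mod (PySem.Int.floordiv number (10 ^ d)) 10
    if digit ≠ 0 then digit == 1 else altScan number d

def is_first_digit_one_alt (number : Int) (maxDigits : Int) : Bool :=
  altScan number maxDigits.toNat

-- ===== PRECONDITION & SPEC =====
def Spec_is_first_digit_one (number : Int) (maxDigits : Int) (out : Bool) : Prop := out = is_first_digit_one_alt number maxDigits
instance (number : Int) (maxDigits : Int) (out : Bool) : Decidable (Spec_is_first_digit_one number maxDigits out) := by unfold Spec_is_first_digit_one; infer_instance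

-- ===== CLAIM (what is proved, stated in full; the proofs are below) =====
def Claim_equal_is_first_digit_one : Prop := ∀ (number : Int) (maxDigits : Int), Dom_is_first_digit_one number maxDigits → Spec_is_first_digit_one number maxDigits (is_first_digit_one number maxDigits)

-- ===== LEMMAS AND PROOFS =====

theorem digit_bounds (a : Int) : 0 ≤ PySem.Int.mod a 10 ∧ PySem.Int.mod a 10 < 10 := by
  rw [PySem.Int.mod_eq_emod_of_pos (by norm_num : (0:Int) < 10)]
  exact ⟨Int.emod_nonneg a (by norm_num), Int.emod_lt_of_pos a (by norm_num)⟩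

theorem foldl_eq_altScan (number : Int) (n : Nat) :
    ((List.range n).map (fun k : Nat => (0 : Int) + (k : Int))).foldl
      (fun result d =>
        let digit := get_digit number d
        if digit == 1 then true
        else if digit > 1 then false
        else result)
      false = altScan number n := by
  induction n with
  | zero => rfl
  | succ m ih =>
    rw [List.range_succ, List.map_append, List.foldl_append, ih]
    simp only [List.map_cons, List.map_nil, List.foldl_cons, List.foldl_nil, altScan]
    have hd : get_digit number ((0 : Int) + (m : Int)) =
        PySem.Int.mod (PySem.Int.floordiv number (10 ^ m)) 10 := by
      simp [get_digit]
    rw [hd]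
    set digit := PySem.Int.mod (PySem.Int.floordiv number (10 ^ m)) 10 with hdig
    obtain ⟨h0, h10⟩ := digit_bounds (PySem.Int.floordiv number (10 ^ m))
    rw [← hdig] at h0 h10
    by_cases h1 : digit = 1
    · simp [h1]
    · by_cases hz : digit = 0
      · simp [hz]
      · have hgt : digit > 1 := by omega
        simp [h1, hz, hgt]

-- ===== VERDICT (by name: the statement is the Claim_ definition above) =====
theorem is_first_digit_one_spec : Claim_equal_is_first_digit_one := by
  intro number maxDigits _
  unfold Spec_is_first_digit_one is_first_digit_one is_first_digit_one_alt
  rw [PySem.List.pyRange_one]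
  have h := foldl_eq_altScan number (maxDigits - 0).toNat
  simpa using h
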